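-- pv_equiv track=rewrite | github.com/nfc18/ContactPlus | contactplus-core/database/contact_intelligence.py | _find_email_duplicates
-- ===== SOURCE A (Python) =====
-- from typing import Dict, List, Tuple, Optional, Any
--
-- def _find_email_duplicates(emails: List[str]) -> List[str]:
--     """Find duplicate emails with different cases"""
--     seen = set()
--     duplicates = []
--
--     for email in emails:
--         email_lower = email.lower()
--         if email_lower in seen:
--             duplicates.append(email)
--         else:
--             seen.add(email_lower)
--
--     return duplicates
-- ===== SOURCE B (Python) =====
-- def _find_email_duplicates(emails):
--     """Find duplicate emails with different cases"""
--     first_idx = {}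
--     for i, email in enumerate(emails):
--         first_idx.setdefault(email.lower(), i)
--     return [email for i, email in enumerate(emails) if first_idx[email.lower()] != i]
-- ===== Notes on version B (the rewrite author's own statement) =====
-- stated objective: alternative
-- what changed: Replaces A's single fused pass with a mutating seen-set by two passes: first an index dict mapping each lowercased email to its first occurrence index (setdefault), then a comprehension emitting exactly the non-first occurrences.
import Mathlib
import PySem

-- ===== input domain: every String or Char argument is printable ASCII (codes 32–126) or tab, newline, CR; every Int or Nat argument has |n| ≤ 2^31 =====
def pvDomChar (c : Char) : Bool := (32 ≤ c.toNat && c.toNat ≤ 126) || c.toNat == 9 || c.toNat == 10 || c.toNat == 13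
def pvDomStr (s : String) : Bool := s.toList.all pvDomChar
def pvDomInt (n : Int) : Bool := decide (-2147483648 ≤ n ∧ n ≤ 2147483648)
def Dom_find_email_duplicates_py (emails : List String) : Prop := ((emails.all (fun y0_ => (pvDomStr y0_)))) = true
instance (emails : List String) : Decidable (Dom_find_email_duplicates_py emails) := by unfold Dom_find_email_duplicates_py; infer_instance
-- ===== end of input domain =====

-- B replaces A's fused seen-set pass by two passes (first-occurrence index dict, then a
-- filtering comprehension); same result and cost, an alternative decomposition.

-- ===== PORT A =====
-- one loop step of A: check the lowered email against 'seen', append to one of the two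
def aStep (st : PySem.Set String × List String) (email : String) :
    PySem.Set String × List String :=
  let email_lower := PySem.Str.lower email
  if PySem.Set.contains st.1 email_lower then
    (st.1, st.2 ++ [email])
  else
    (PySem.Set.add st.1 email_lower, st.2)

def find_email_duplicates_py (emails : List String) : List String :=
  (emails.foldl aStep (PySem.Set.empty, [])).2

-- ===== PORT B =====
-- first pass of B: first_idx.setdefault(email.lower(), i) over enumerate(emails)
def bFirstIdx (emails : List String) : PySem.Dict String Int :=
  (PySem.List.enumerate emails 0).foldl
    (fun d p => d.setdefault (PySem.Str.lower p.2) p.1) PySem.Dict.empty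

-- second pass of B; every key looked up was inserted by the first pass, so Python's
-- first_idx[...] never raises and 'get? … ≠ some i' is exact here
def find_email_duplicates_py_alt (emails : List String) : List String :=
  let first_idx := bFirstIdx emails
  (PySem.List.enumerate emails 0).foldl
    (fun acc p =>
      if first_idx.get? (PySem.Str.lower p.2) ≠ some p.1 then acc ++ [p.2] else acc) []

-- ===== PRECONDITION & SPEC =====
def Spec_find_email_duplicates_py (emails : List String) (out : List String) : Prop := out = find_email_duplicates_py_alt emails
instance (emails : List String) (out : List String) : Decidable (Spec_find_email_duplicates_py emails out) := by unfold Spec_find_email_duplicates_py; infer_instance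

-- ===== CLAIM (what is proved, stated in full; the proofs are below) =====
def Claim_equal_find_email_duplicates_py : Prop := ∀ (emails : List String), Dom_find_email_duplicates_py emails → Spec_find_email_duplicates_py emails (find_email_duplicates_py emails)

-- ===== LEMMAS AND PROOFS =====

-- A's step always has 'Set.add' as its first component (add is a no-op when present)
theorem aStep_fst (st : PySem.Set String × List String) (e : String) :
    (aStep st e).1 = PySem.Set.add st.1 (PySem.Str.lower e) := by
  unfold aStep PySem.Set.add
  split_ifs with h <;> simp_all

-- the 'seen' component after A's loop is the set of lowered emails seen so far
theorem aSeen (xs : List String) (st : PySem.Set String × List String) :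
    (xs.foldl aStep st).1 = (xs.map PySem.Str.lower).foldl PySem.Set.add st.1 := by
  induction xs generalizing st with
  | nil => rfl
  | cons e xs ih => simp [List.foldl_cons, ih, aStep_fst]

theorem aSeen_ofList (xs : List String) :
    (xs.foldl aStep (PySem.Set.empty, [])).1 = PySem.Set.ofList (xs.map PySem.Str.lower) := by
  rw [PySem.Set.ofList_eq_foldl, aSeen]; rfl

-- appending one email to the input appends it to A's output iff its lowering was seen
theorem a_append (xs : List String) (e : String) :
    find_email_duplicates_py (xs ++ [e]) =
      find_email_duplicates_py xs ++
        (if PySem.Str.lower e ∈ xs.map PySem.Str.lower then [e] else []) := by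
  unfold find_email_duplicates_py
  rw [List.foldl_append]
  rcases h : List.foldl aStep (PySem.Set.empty, []) xs with ⟨s, acc⟩
  have hs : s = PySem.Set.ofList (xs.map PySem.Str.lower) := by
    have := aSeen_ofList xs; rw [h] at this; exact this
  simp only [List.foldl_cons, List.foldl_nil, aStep]
  by_cases hmem : PySem.Str.lower e ∈ xs.map PySem.Str.lower <;>
    simp [hs, PySem.Set.mem_ofList, hmem]

-- the dict built by B's first pass looked up = first matching index in the list
theorem bBuild_get (l : List (Int × String)) (d : PySem.Dict String Int) (k : String) :
    (l.foldl (fun d p => d.setdefault (PySem.Str.lower p.2) p.1) d).get? k =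
      (d.get? k).or ((l.find? (fun p => PySem.Str.lower p.2 == k)).map (·.1)) := by
  induction l generalizing d with
  | nil => simp
  | cons p l ih =>
    rw [List.foldl_cons, ih]
    by_cases hk : k = PySem.Str.lower p.2
    · subst hk
      rw [PySem.Dict.get?_setdefault_self, List.find?_cons]
      cases d.get? (PySem.Str.lower p.2) <;> simp
    · rw [PySem.Dict.get?_setdefault_of_ne _ _ hk, List.find?_cons]
      have hne : (PySem.Str.lower p.2 == k) = false := by
        simp; exact fun h => hk h.symm
      simp [hne]

theorem bFirstIdx_get (emails : List String) (k : String) :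
    (bFirstIdx emails).get? k =
      ((PySem.List.enumerate emails 0).find? (fun p => PySem.Str.lower p.2 == k)).map (·.1) := by
  unfold bFirstIdx
  rw [bBuild_get]; rfl

-- appending one email to B's input appends it to B's output under the same condition
theorem b_append (xs : List String) (e : String) :
    find_email_duplicates_py_alt (xs ++ [e]) =
      find_email_duplicates_py_alt xs ++
        (if PySem.Str.lower e ∈ xs.map PySem.Str.lower then [e] else []) := by
  unfold find_email_duplicates_py_alt
  have henum : PySem.List.enumerate (xs ++ [e]) 0 =
      PySem.List.enumerate xs 0 ++ [((xs.length : Int), e)] := by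
    rw [PySem.List.enumerate_append]
    simp [PySem.List.enumerate_cons, PySem.List.enumerate_nil]
  rw [henum, List.foldl_append]
  -- each element of enumerate xs 0 has an index < xs.length
  have hidx : ∀ p ∈ PySem.List.enumerate xs 0, ∃ k : Nat, k < xs.length ∧
      p.1 = (k : Int) ∧ p.2 = xs.getD k "" := by
    intro p hp
    rcases (PySem.List.mem_enumerate_iff xs 0 p).1 hp with ⟨k, hk, rfl⟩
    exact ⟨k, hk, by simp, by simp [List.getD_eq_getElem?_getD, hk]⟩
  -- on the old elements, the condition computed from the extended dict agrees
  have hcong : List.foldl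
      (fun acc p => if (bFirstIdx (xs ++ [e])).get? (PySem.Str.lower p.2) ≠ some p.1
        then acc ++ [p.2] else acc) [] (PySem.List.enumerate xs 0) =
      List.foldl
      (fun acc p => if (bFirstIdx xs).get? (PySem.Str.lower p.2) ≠ some p.1
        then acc ++ [p.2] else acc) [] (PySem.List.enumerate xs 0) := by
    apply PySem.List.foldl_congr_mem
    intro acc p hp
    have hsome : ((PySem.List.enumerate xs 0).find?
        (fun q => PySem.Str.lower q.2 == PySem.Str.lower p.2)).isSome = true := by
      rw [List.find?_isSome]; exact ⟨p, hp, by simp⟩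
    have : (bFirstIdx (xs ++ [e])).get? (PySem.Str.lower p.2) =
        (bFirstIdx xs).get? (PySem.Str.lower p.2) := by
      rw [bFirstIdx_get, bFirstIdx_get, henum, List.find?_append]
      rcases Option.isSome_iff_exists.1 hsome with ⟨q, hq⟩
      rw [hq]; rfl
    rw [this]
  rw [hcong]
  -- the last step: the appended element is a duplicate iff its lowering occurs in xs
  simp only [List.foldl_cons, List.foldl_nil]
  by_cases hmem : PySem.Str.lower e ∈ xs.map PySem.Str.lower
  · -- some earlier index matches, and it is < xs.length, hence ≠ xs.length
    have hsome : ((PySem.List.enumerate xs 0).find?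
        (fun q => PySem.Str.lower q.2 == PySem.Str.lower e)).isSome = true := by
      rw [List.find?_isSome]
      rcases List.mem_map.1 hmem with ⟨x, hx, hlx⟩
      rcases List.mem_iff_getElem.1 hx with ⟨k, hk, rfl⟩
      exact ⟨((k : Int), xs[k]), (PySem.List.mem_enumerate_iff xs 0 _).2 ⟨k, hk, by simp⟩,
        by simp [hlx]⟩
    rcases Option.isSome_iff_exists.1 hsome with ⟨q, hq⟩
    have hqmem : q ∈ PySem.List.enumerate xs 0 := List.mem_of_find?_eq_some hq
    rcases hidx q hqmem with ⟨k, hk, hq1, _⟩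
    have hne : (bFirstIdx (xs ++ [e])).get? (PySem.Str.lower e) ≠ some (xs.length : Int) := by
      rw [bFirstIdx_get, henum, List.find?_append, hq]
      simp only [Option.some_or, Option.map_some]
      intro hcontra
      have : q.1 = (xs.length : Int) := by injection hcontra
      rw [hq1] at this
      omega
    simp [hne, hmem]
  · -- no earlier index matches: find? hits exactly the appended element
    have hnone : ((PySem.List.enumerate xs 0).find?
        (fun q => PySem.Str.lower q.2 == PySem.Str.lower e)) = none := by
      rw [List.find?_eq_none]
      intro q hq hbeq
      rcases hidx q hq with ⟨k, hk, _, hq2⟩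
      apply hmem
      rw [← (by simpa using hbeq : PySem.Str.lower q.2 = PySem.Str.lower e)]
      refine List.mem_map.2 ⟨q.2, ?_, rfl⟩
      rw [hq2]
      simp [List.getD_eq_getElem?_getD, hk, List.mem_iff_getElem]
      exact ⟨k, hk, rfl⟩
    have heq : (bFirstIdx (xs ++ [e])).get? (PySem.Str.lower e) = some (xs.length : Int) := by
      rw [bFirstIdx_get, henum, List.find?_append, hnone]
      simp
    simp [heq, hmem]

-- ===== VERDICT (by name: the statement is the Claim_ definition above) =====
theorem find_email_duplicates_py_spec : Claim_equal_find_email_duplicates_py := by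
  intro emails hd
  clear hd
  unfold Spec_find_email_duplicates_py
  induction emails using List.reverseRecOn with
  | nil => rfl
  | append_singleton xs e ih => rw [a_append, b_append, ih]
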